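-- pv_equiv track=rewrite | github.com/rhkrdudrb/py | 20230429문자열나누기.py | solution
-- ===== SOURCE A (Python) =====
-- def solution(s):
--     s = list(s)
--     answer = 0
--     cnt1 = 0
--     cnt2 = 0
--     for letter in list(s):
--         x = s[0]
--         if letter == x:
--             cnt1 +=1
--         else:
--             cnt2 +=1
--         if cnt1 == cnt2 :
--
--             del s[0:cnt1+cnt2]
--             answer +=1
--             cnt1 = 0
--             cnt2 = 0
--     if len(s) != 0 :
--         answer+=1
--     return answer
-- ===== SOURCE B (Python) =====
-- def solution(s):
--     answer = 0
--     same = 0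
--     diff = 0
--     first = None
--     for c in s:
--         if same == 0:
--             first = c
--         if c == first:
--             same += 1
--         else:
--             diff += 1
--         if same == diff:
--             answer += 1
--             same = 0
--             diff = 0
--     if same != diff:
--         answer += 1
--     return answer
-- ===== Notes on version B (the rewrite author's own statement) =====
-- stated objective: faster
-- what changed: B does a single pass over the string tracking the current block's first character in a variable and two counters, instead of A's copying the string to a list and repeatedly deleting the processed prefix with del (an O(n) operation inside the loop) while re-reading s[0].
import Mathlib
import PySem

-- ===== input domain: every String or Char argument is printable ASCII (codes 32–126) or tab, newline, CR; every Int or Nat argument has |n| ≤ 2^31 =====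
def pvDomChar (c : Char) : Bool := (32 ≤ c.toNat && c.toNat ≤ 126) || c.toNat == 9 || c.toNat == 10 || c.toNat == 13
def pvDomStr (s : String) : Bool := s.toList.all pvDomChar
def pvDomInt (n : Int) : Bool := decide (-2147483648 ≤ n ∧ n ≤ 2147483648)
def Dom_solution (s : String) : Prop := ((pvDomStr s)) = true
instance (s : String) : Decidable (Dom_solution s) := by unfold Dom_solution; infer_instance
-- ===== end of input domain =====

-- B replaces A's quadratic delete-the-prefix-from-a-list loop by a single pass with a
-- tracked first character and two counters (objective: faster, asymptotic O(n^2) -> O(n)).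

-- ===== PORT A =====
-- loop state: (s, answer, cnt1, cnt2); none = IndexError from s[0] (never occurs: the
-- deleted prefix always stays behind the iteration point, proved below)
def solutionStep (st : Option (List Char × Int × Int × Int)) (letter : Char) :
    Option (List Char × Int × Int × Int) :=
  match st with
  | none => none
  | some (s, answer, cnt1, cnt2) =>
    match PySem.List.pyGet? s 0 with          -- x = s[0]
    | none => none
    | some x =>
      let (cnt1, cnt2) := if letter == x then (cnt1 + 1, cnt2) else (cnt1, cnt2 + 1)
      if cnt1 == cnt2 then
        -- del s[0:cnt1+cnt2]
        some (PySem.List.slice s (some (cnt1 + cnt2)) none, answer + 1, 0, 0)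
      else
        some (s, answer, cnt1, cnt2)

def solution (s : String) : Int :=
  match s.toList.foldl solutionStep (some (s.toList, 0, 0, 0)) with
  | none => 0
  | some (s, answer, _, _) => if s.length ≠ 0 then answer + 1 else answer

-- ===== PORT B =====
-- loop state: (answer, same, diff, first); first is written before it is ever read
-- (Source B initialises it to None), the initial ' ' is never compared
def solutionAltStep (st : Int × Int × Int × Char) (c : Char) : Int × Int × Int × Char :=
  match st with
  | (answer, same, diff, first) =>
    let first := if same == 0 then c else first
    let (same, diff) := if c == first then (same + 1, diff) else (same, diff + 1)
    if same == diff then (answer + 1, 0, 0, first) else (answer, same, diff, first)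

def solution_alt (s : String) : Int :=
  match s.toList.foldl solutionAltStep (0, 0, 0, ' ') with
  | (answer, same, diff, _) => if same != diff then answer + 1 else answer

-- ===== PRECONDITION & SPEC =====
def Spec_solution (s : String) (out : Int) : Prop := out = solution_alt s
instance (s : String) (out : Int) : Decidable (Spec_solution s out) := by unfold Spec_solution; infer_instance

-- ===== CLAIM (what is proved, stated in full; the proofs are below) =====
def Claim_equal_solution : Prop := ∀ (s : String), Dom_solution s → Spec_solution s (solution s)

-- ===== LEMMAS AND PROOFS =====

-- finishers of the two loops, as proof-side names (definitionally the matches in the ports)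
def finA (r : Option (List Char × Int × Int × Int)) : Int :=
  match r with
  | none => 0
  | some (s, answer, _, _) => if s.length ≠ 0 then answer + 1 else answer

def finB (r : Int × Int × Int × Char) : Int :=
  match r with
  | (answer, same, diff, _) => if same != diff then answer + 1 else answer

-- Main loop invariant: A's remaining list is (processed part of the current block) ++ tail
-- still to iterate; the block prefix p has length cnt1+cnt2 and starts with B's `first`.
lemma loop_eq (t : List Char) : ∀ (p : List Char) (ans c1 c2 : Int) (first : Char),
    (p.length : Int) = c1 + c2 → 0 ≤ c1 → 0 ≤ c2 →
    (c1 = 0 → c2 = 0) → (c1 = c2 → c1 = 0) →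
    (∀ a, p.head? = some a → a = first) →
    finA (t.foldl solutionStep (some (p ++ t, ans, c1, c2)))
      = finB (t.foldl solutionAltStep (ans, c1, c2, first)) := by
  induction t with
  | nil =>
    intro p ans c1 c2 first hlen h1 h2 h3 h4 _
    simp only [List.foldl_nil, List.append_nil, finA, finB]
    by_cases hc : c1 = c2
    · have hc1 : c1 = 0 := h4 hc
      have hp : p.length = 0 := by omega
      simp [hp, hc, bne]
    · have hp : p.length ≠ 0 := by omega
      simp [hp, hc, bne]
  | cons c tl ih =>
    intro p ans c1 c2 first hlen h1 h2 h3 h4 h5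
    simp only [List.foldl_cons]
    cases p with
    | nil =>
      -- start of a new block: c1 = c2 = 0, x = c, first := c
      have hc1 : c1 = 0 := by simp at hlen; omega
      have hc2 : c2 = 0 := h3 hc1
      subst hc1; subst hc2
      have hA : solutionStep (some ([] ++ (c :: tl), ans, 0, 0)) c
          = some ([c] ++ tl, ans, 1, 0) := by
        simp [solutionStep, PySem.List.pyGet?, PySem.List.pyIdx?]
      have hB : solutionAltStep (ans, 0, 0, first) c = (ans, 1, 0, c) := by
        simp [solutionAltStep]
      rw [hA, hB]
      exact ih [c] ans 1 0 c (by simp) (by omega) (by omega)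
        (by omega) (by omega) (by intro a ha; simp at ha; exact ha.symm)
    | cons q qs =>
      -- mid-block: x = q = first, c1 >= 1 so B keeps first
      have hq : q = first := h5 q rfl
      have hlen' : (qs.length : Int) + 1 = c1 + c2 := by
        simpa using hlen
      have hc1pos : 1 <= c1 := by
        by_contra h
        have h0 : c1 = 0 := by omega
        have := h3 h0
        omega
      have hget : PySem.List.pyGet? ((q :: qs) ++ (c :: tl)) 0 = some q := by
        have h : ((0 : Int)) = ((0 : Nat) : Int) := by norm_num
        rw [h, PySem.List.pyGet?_natCast]
        simp
      have hfirst : (if c1 == 0 then c else first) = first := by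
        have hne : c1 ≠ 0 := by omega
        simp [hne]
      have happ : (q :: qs) ++ (c :: tl) = ((q :: qs) ++ [c]) ++ tl := by simp
      have hslice : ∀ k : Int, k = c1 + c2 + 1 →
          PySem.List.slice ((q :: qs) ++ (c :: tl)) (some k) none = tl := by
        intro k hk
        rw [PySem.List.slice_from _ (by omega)]
        have hkn : k.toNat = (q :: qs).length + 1 := by
          simp only [List.length_cons]
          omega
        rw [hkn, happ]
        have h2 : ((q :: qs) ++ [c]).length = (q :: qs).length + 1 := by simp
        rw [← h2]
        exact List.drop_left (l₁ := (q :: qs) ++ [c]) (l₂ := tl)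
      have hhead : ∀ a : Char, ((q :: qs) ++ [c]).head? = some a → a = first := by
        intro a ha
        simp at ha
        rw [← ha]; exact hq
      by_cases hce : c = q
      · -- letter matches the block's first char
        have hcq : (c == q) = true := by simp [hce]
        have hcf : (c == first) = true := by simp [hce, hq]
        by_cases heq : c1 + 1 = c2
        · -- balance reached: A deletes the processed prefix, B resets
          have hA : solutionStep (some ((q :: qs) ++ (c :: tl), ans, c1, c2)) c
              = some (tl, ans + 1, 0, 0) := by
            simp only [solutionStep, hget, hcq, if_true]
            rw [if_pos (by simp [heq])]
            rw [hslice (c1 + 1 + c2) (by omega)]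
          have hB : solutionAltStep (ans, c1, c2, first) c = (ans + 1, 0, 0, first) := by
            simp only [solutionAltStep, hfirst, hcf, if_true]
            rw [if_pos (by simp [heq])]
          rw [hA, hB]
          have := ih [] (ans + 1) 0 0 first (by simp) (by omega) (by omega)
            (by omega) (by omega) (by intro a ha; simp at ha)
          simpa using this
        · have hA : solutionStep (some ((q :: qs) ++ (c :: tl), ans, c1, c2)) c
              = some (((q :: qs) ++ [c]) ++ tl, ans, c1 + 1, c2) := by
            simp only [solutionStep, hget, hcq, if_true]
            rw [if_neg (by simp [heq]), happ]
          have hB : solutionAltStep (ans, c1, c2, first) c = (ans, c1 + 1, c2, first) := by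
            simp only [solutionAltStep, hfirst, hcf, if_true]
            rw [if_neg (by simp [heq])]
          rw [hA, hB]
          exact ih ((q :: qs) ++ [c]) ans (c1 + 1) c2 first
            (by simp; omega) (by omega) (by omega) (by omega) (by omega) hhead
      · -- letter differs from the block's first char
        have hcq : (c == q) = false := by simp [hce]
        have hcf : (c == first) = false := by
          rw [← hq]; simp [hce]
        by_cases heq : c1 = c2 + 1
        · have hA : solutionStep (some ((q :: qs) ++ (c :: tl), ans, c1, c2)) c
              = some (tl, ans + 1, 0, 0) := by
            simp only [solutionStep, hget, hcq, if_false, Bool.false_eq_true]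
            rw [if_pos (by simp [heq])]
            rw [hslice (c1 + (c2 + 1)) (by omega)]
          have hB : solutionAltStep (ans, c1, c2, first) c = (ans + 1, 0, 0, first) := by
            simp only [solutionAltStep, hfirst, hcf, if_false, Bool.false_eq_true]
            rw [if_pos (by simp [heq])]
          rw [hA, hB]
          have := ih [] (ans + 1) 0 0 first (by simp) (by omega) (by omega)
            (by omega) (by omega) (by intro a ha; simp at ha)
          simpa using this
        · have hA : solutionStep (some ((q :: qs) ++ (c :: tl), ans, c1, c2)) c
              = some (((q :: qs) ++ [c]) ++ tl, ans, c1, c2 + 1) := by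
            simp only [solutionStep, hget, hcq, if_false, Bool.false_eq_true]
            rw [if_neg (by simp [heq]), happ]
          have hB : solutionAltStep (ans, c1, c2, first) c = (ans, c1, c2 + 1, first) := by
            simp only [solutionAltStep, hfirst, hcf, if_false, Bool.false_eq_true]
            rw [if_neg (by simp [heq])]
          rw [hA, hB]
          exact ih ((q :: qs) ++ [c]) ans c1 (c2 + 1) first
            (by simp; omega) (by omega) (by omega) (by omega) (by omega) hhead

-- ===== VERDICT (by name: the statement is the Claim_ definition above) =====
theorem solution_spec : Claim_equal_solution := by
  intro s _
  show solution s = solution_alt s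
  have hA : solution s = finA (s.toList.foldl solutionStep (some (s.toList, 0, 0, 0))) := rfl
  have hB : solution_alt s = finB (s.toList.foldl solutionAltStep (0, 0, 0, ' ')) := rfl
  rw [hA, hB]
  have := loop_eq s.toList [] 0 0 0 ' ' (by simp) (by omega) (by omega)
    (by omega) (by omega) (by intro a ha; simp at ha)
  simpa using this
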